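-- pv_equiv track=rewrite | github.com/newearthmartin/advent2023 | 09.py | get_diff_lines
-- ===== SOURCE A (Python) =====
-- def get_diff_lines(line):
--     diff_lines = [line.copy()]
--     while not all(e == 0 for e in diff_lines[-1]):
--         line_len = len(diff_lines[-1])
--         diff_lines.append([0] * (line_len - 1))
--         for i in range(line_len - 1):
--             diff_lines[-1][i] = diff_lines[-2][i + 1] - diff_lines[-2][i]
--     return list(reversed(diff_lines))
-- ===== SOURCE B (Python) =====
-- def get_diff_lines(line):
--     if all(e == 0 for e in line):
--         return [line.copy()]
--     diff = [line[i + 1] - line[i] for i in range(len(line) - 1)]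
--     return get_diff_lines(diff) + [line.copy()]
-- ===== Notes on version B (the rewrite author's own statement) =====
-- stated objective: simpler
-- what changed: Replaces A's iterative append-then-reverse while-loop over a growing pyramid list by direct structural recursion on the difference line (base case: all-zero line), producing the bottom-to-top order with no explicit reverse.
import Mathlib
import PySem

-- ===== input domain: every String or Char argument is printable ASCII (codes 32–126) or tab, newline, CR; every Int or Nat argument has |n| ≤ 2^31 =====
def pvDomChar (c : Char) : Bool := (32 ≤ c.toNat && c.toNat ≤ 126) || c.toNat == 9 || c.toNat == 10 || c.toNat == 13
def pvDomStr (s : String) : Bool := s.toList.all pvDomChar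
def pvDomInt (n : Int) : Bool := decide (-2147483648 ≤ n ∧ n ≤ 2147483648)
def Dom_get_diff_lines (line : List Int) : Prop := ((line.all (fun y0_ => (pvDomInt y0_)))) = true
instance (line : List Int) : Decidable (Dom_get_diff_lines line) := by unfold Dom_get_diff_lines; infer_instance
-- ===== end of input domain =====

-- B replaces A's iterative append-then-reverse pyramid construction by direct structural
-- recursion on the difference line (simpler decomposition, same cost); equal return values.

-- ===== PORT A =====
-- inner 'for i in range(line_len-1): diff_lines[-1][i] = ...' : fold over the range, setting
-- index i of the freshly appended [0]*(line_len-1) list (indices are always in range, so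
-- pyGetD with default 0 is exact here).
def pvAStep (cur : List Int) : List Int :=
  (PySem.List.pyRange 0 ((cur.length : Int) - 1) 1).foldl
    (fun d i => d.set i.toNat (PySem.List.pyGetD cur (i + 1) 0 - PySem.List.pyGetD cur i 0))
    (List.replicate ((cur.length : Int) - 1).toNat 0)

theorem pvFoldlSet_length (f : Int → Int) (l : List Int) (init : List Int) :
    (l.foldl (fun d i => d.set i.toNat (f i)) init).length = init.length := by
  induction l generalizing init with
  | nil => rfl
  | cons x xs ih => simp [List.foldl_cons, ih]

theorem pvAStep_length (cur : List Int) :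
    (pvAStep cur).length = ((cur.length : Int) - 1).toNat := by
  unfold pvAStep
  rw [pvFoldlSet_length]
  simp

-- the while loop; diff_lines accumulated left-to-right, reversed at the end
def pvALoop (cur : List Int) (acc : List (List Int)) : List (List Int) :=
  if cur.all (· == 0) then acc
  else pvALoop (pvAStep cur) (acc ++ [pvAStep cur])
termination_by cur.length
decreasing_by
  rw [pvAStep_length]
  cases cur with
  | nil => simp_all
  | cons x xs => simp

def get_diff_lines (line : List Int) : List (List Int) :=
  (pvALoop line [line]).reverse

-- ===== PORT B =====
-- 'diff = [line[i+1]-line[i] for i in range(len(line)-1)]' (indices always in range)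
def pvBStep (line : List Int) : List Int :=
  (PySem.List.pyRange 0 ((line.length : Int) - 1) 1).map
    (fun i => PySem.List.pyGetD line (i + 1) 0 - PySem.List.pyGetD line i 0)

theorem pvBStep_length (line : List Int) :
    (pvBStep line).length = ((line.length : Int) - 1).toNat := by
  simp [pvBStep, PySem.List.length_pyRange_one]

def get_diff_lines_alt (line : List Int) : List (List Int) :=
  if line.all (· == 0) then [line]
  else get_diff_lines_alt (pvBStep line) ++ [line]
termination_by line.length
decreasing_by
  rw [pvBStep_length]
  cases line with
  | nil => simp_all
  | cons x xs => simp

-- ===== PRECONDITION & SPEC =====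
def Spec_get_diff_lines (line : List Int) (out : List (List Int)) : Prop := out = get_diff_lines_alt line
instance (line : List Int) (out : List (List Int)) : Decidable (Spec_get_diff_lines line out) := by unfold Spec_get_diff_lines; infer_instance

-- ===== CLAIM (what is proved, stated in full; the proofs are below) =====
def Claim_equal_get_diff_lines : Prop := ∀ (line : List Int), Dom_get_diff_lines line → Spec_get_diff_lines line (get_diff_lines line)

-- ===== LEMMAS AND PROOFS =====

-- folding 'set i (f i)' over range n on [0]*n ++ tail writes exactly the map
theorem pvFoldlSet_eq_map (f : Int → Int) (n : Nat) :
    ∀ tail : List Int,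
      ((PySem.List.pyRange 0 (n : Int) 1).foldl
        (fun d i => d.set i.toNat (f i)) (List.replicate n 0 ++ tail))
      = (PySem.List.pyRange 0 (n : Int) 1).map f ++ tail := by
  induction n with
  | zero => intro tail; simp
  | succ n ih =>
    intro tail
    have hsp : ((n : Int) + 1) = ((n + 1 : Nat) : Int) := by push_cast; ring
    rw [← hsp, PySem.List.pyRange_one_succ_right (by positivity)]
    have hrep : List.replicate (n + 1) (0 : Int) ++ tail
        = List.replicate n 0 ++ (0 :: tail) := by
      simp [List.replicate_succ']
    rw [List.foldl_append, hrep, ih (0 :: tail)]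
    have hlen : ((PySem.List.pyRange 0 (n : Int) 1).map f).length = n := by
      simp [PySem.List.length_pyRange_one]
    simp only [List.foldl_cons, List.foldl_nil, List.map_append, List.map_cons, List.map_nil]
    rw [List.set_append_right _ _ (by omega), hlen, Int.toNat_natCast]
    simp

theorem pvStep_eq (cur : List Int) : pvAStep cur = pvBStep cur := by
  cases cur with
  | nil =>
    simp [pvAStep, pvBStep, PySem.List.pyRange_one_eq_nil (by norm_num : (-1 : Int) ≤ 0)]
  | cons x xs =>
    unfold pvAStep pvBStep
    have h : ((x :: xs).length : Int) - 1 = ((xs.length : Nat) : Int) := by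
      simp
    rw [h]
    have := pvFoldlSet_eq_map
      (fun i => PySem.List.pyGetD (x :: xs) (i + 1) 0 - PySem.List.pyGetD (x :: xs) i 0)
      xs.length []
    simpa using this

-- the chain of difference lines strictly below cur, top to bottom
def pvTail (cur : List Int) : List (List Int) :=
  if cur.all (· == 0) then []
  else pvBStep cur :: pvTail (pvBStep cur)
termination_by cur.length
decreasing_by
  rw [pvBStep_length]
  cases cur with
  | nil => simp_all
  | cons x xs => simp

theorem pvALoop_eq (cur : List Int) (acc : List (List Int)) :
    pvALoop cur acc = acc ++ pvTail cur := by
  fun_induction pvALoop cur acc with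
  | case1 cur acc h => rw [pvTail, if_pos h]; simp
  | case2 cur acc h ih =>
    rw [ih]
    conv_rhs => rw [pvTail, if_neg h]
    rw [pvStep_eq]
    simp

theorem pvAlt_eq (cur : List Int) :
    get_diff_lines_alt cur = (pvTail cur).reverse ++ [cur] := by
  fun_induction get_diff_lines_alt cur with
  | case1 cur h => rw [pvTail, if_pos h]; simp
  | case2 cur h ih =>
    rw [ih]
    conv_rhs => rw [pvTail, if_neg h]
    simp

-- ===== VERDICT (by name: the statement is the Claim_ definition above) =====
theorem get_diff_lines_spec : Claim_equal_get_diff_lines := by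
  intro line _
  unfold Spec_get_diff_lines get_diff_lines
  rw [pvALoop_eq, pvAlt_eq]
  simp
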